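-- pv_equiv track=rewrite | github.com/brainybryan69/videotto-assessment | src/debouncer.py | debounce_speaker_ids
-- ===== SOURCE A (Python) =====
-- def debounce_speaker_ids(speaker_track_ids, min_hold_frames=15):
--     """
--     Remove rapid speaker-ID bounces shorter than min_hold_frames.
--
--     Speaker detection sometimes flickers the active-speaker label during
--     crosstalk or brief classification uncertainty, producing 1-10 frame
--     segments that cause jarring rapid-fire crop snaps. This pre-filter
--     replaces those short segments with the surrounding stable speaker ID
--     so the downstream dead-zone tracker never sees them.
--
--     Algorithm:
--       1. Run-length encode the raw IDs into (track_id, start, length) runs.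
--       2. For any run shorter than min_hold_frames, replace it with the
--          previous stable run's ID (or the next stable run if it's the first).
--       3. Expand back to a per-frame list.
--
--     Args:
--         speaker_track_ids: Per-frame list of speaker IDs (int or None).
--             None means no speaker detected at that frame.
--         min_hold_frames: Minimum frames a speaker must hold to be "stable".
--
--     Returns:
--         Same-length list with short flicker runs replaced by nearest stable ID.
--         None segments are never modified.
--
--     Examples:
--         >>> debounce_speaker_ids([0]*50 + [1]*3 + [0]*50, min_hold_frames=10)
--         [0]*103  # The 3-frame speaker-1 segment is replaced by speaker 0
--
--         >>> debounce_speaker_ids([None]*10 + [0]*50, min_hold_frames=15)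
--         [None]*10 + [0]*50  # None segments are untouched
--     """
--     if not speaker_track_ids:
--         return []
--
--     # Step 1: RLE encode into [track_id, start, length] runs
--     runs = []
--     i = 0
--     while i < len(speaker_track_ids):
--         current = speaker_track_ids[i]
--         j = i
--         while j < len(speaker_track_ids) and speaker_track_ids[j] == current:
--             j += 1
--         runs.append([current, i, j - i])
--         i = j
--
--     # Step 2: Replace short non-None runs with nearest stable neighbour
--     for idx in range(len(runs)):
--         track_id, _start, length = runs[idx]
--
--         if track_id is None or length >= min_hold_frames:
--             continue
--
--         # Prefer previous stable non-None run
--         replacement = None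
--         for prev in range(idx - 1, -1, -1):
--             if runs[prev][0] is not None and runs[prev][2] >= min_hold_frames:
--                 replacement = runs[prev][0]
--                 break
--
--         # Fall back to next stable non-None run
--         if replacement is None:
--             for nxt in range(idx + 1, len(runs)):
--                 if runs[nxt][0] is not None and runs[nxt][2] >= min_hold_frames:
--                     replacement = runs[nxt][0]
--                     break
--
--         if replacement is not None:
--             runs[idx][0] = replacement
--
--     # Step 3: Expand back to per-frame list
--     result = []
--     for track_id, _start, length in runs:
--         result.extend([track_id] * length)
--
--     return result
-- ===== SOURCE B (Python) =====
-- def debounce_speaker_ids(speaker_track_ids, min_hold_frames=15):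
--     """Same behaviour as A, but the nearest-stable-neighbour lookup is done with
--     one forward and one backward prefix pass over the runs (O(n)) instead of a
--     nested scan per short run (O(R^2))."""
--     # Run-length encode in one pass: [id, length] pairs.
--     runs = []
--     for x in speaker_track_ids:
--         if runs and runs[-1][0] == x:
--             runs[-1][1] += 1
--         else:
--             runs.append([x, 1])
--
--     def stable(tid, ln):
--         return tid is not None and ln >= min_hold_frames
--
--     # prev_stable[k] = ID of the nearest stable run before run k (None if none).
--     prev_stable = []
--     cur = None
--     for tid, ln in runs:
--         prev_stable.append(cur)
--         if stable(tid, ln):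
--             cur = tid
--
--     # next_stable[k] = ID of the nearest stable run after run k (None if none).
--     next_stable = []
--     cur = None
--     for tid, ln in reversed(runs):
--         next_stable.append(cur)
--         if stable(tid, ln):
--             cur = tid
--     next_stable.reverse()
--
--     out = []
--     for (tid, ln), p, nx in zip(runs, prev_stable, next_stable):
--         if tid is not None and ln < min_hold_frames:
--             rep = p if p is not None else nx
--             if rep is not None:
--                 tid = rep
--         out.extend([tid] * ln)
--     return out
-- ===== Notes on version B (the rewrite author's own statement) =====
-- stated objective: faster
-- what changed: Replaces the per-short-run nested backward/forward scans over the run list with one forward and one backward prefix pass that precompute the nearest stable run ID on each side, and builds the runs in a single grouping pass.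
import Mathlib
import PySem

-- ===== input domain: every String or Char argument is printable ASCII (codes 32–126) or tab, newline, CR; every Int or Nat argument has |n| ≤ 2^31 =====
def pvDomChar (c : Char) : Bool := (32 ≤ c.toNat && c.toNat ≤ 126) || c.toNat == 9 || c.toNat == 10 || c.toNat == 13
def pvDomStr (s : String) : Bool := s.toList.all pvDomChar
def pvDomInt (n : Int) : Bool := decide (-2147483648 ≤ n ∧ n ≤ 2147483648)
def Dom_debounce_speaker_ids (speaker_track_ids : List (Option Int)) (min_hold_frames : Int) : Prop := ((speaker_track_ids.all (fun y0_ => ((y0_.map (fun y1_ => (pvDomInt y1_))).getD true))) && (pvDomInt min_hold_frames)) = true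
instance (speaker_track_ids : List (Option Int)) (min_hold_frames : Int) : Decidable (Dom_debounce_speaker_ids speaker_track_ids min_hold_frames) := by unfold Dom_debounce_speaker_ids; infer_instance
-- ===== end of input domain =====

-- B replaces A's per-short-run nested neighbour scans (O(R^2) over runs) with one
-- forward and one backward prefix pass precomputing the nearest stable ID on each side (O(n)).

-- ===== PORT A =====
-- inner while loop of step 1: counts how many further frames equal `current`
def pvInnerA (current : Option Int) : List (Option Int) → Nat
  | [] => 0
  | y :: ys => if y = current then 1 + pvInnerA current ys else 0

-- outer while loop of step 1: RLE encode into (track_id, start, length) runs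
def pvOuterA : List (Option Int) → Nat → List (Option Int × Nat × Nat)
  | [], _ => []
  | y :: ys, i =>
      (y, i, 1 + pvInnerA y ys) :: pvOuterA (ys.drop (pvInnerA y ys)) (i + (1 + pvInnerA y ys))
termination_by xs _ => xs.length
decreasing_by simp

-- `for prev in range(idx-1, -1, -1)` backward first-stable scan
def pvSearchPrevA (m : Int) (rs : List (Option Int × Nat × Nat)) : Nat → Option Int
  | 0 => none
  | k + 1 =>
      match rs[k]? with
      | some (t, _, l) => if t ≠ none ∧ m ≤ (l : Int) then t else pvSearchPrevA m rs k
      | none => pvSearchPrevA m rs k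

-- `for nxt in range(idx+1, len(runs))` forward first-stable scan (over the suffix)
def pvFirstStableA (m : Int) : List (Option Int × Nat × Nat) → Option Int
  | [] => none
  | (t, _, l) :: rest => if t ≠ none ∧ m ≤ (l : Int) then t else pvFirstStableA m rest

-- one iteration of step 2's `for idx in range(len(runs))` loop (in-place update of runs[idx][0])
def pvStepA (m : Int) (rs : List (Option Int × Nat × Nat)) (idx : Nat) : List (Option Int × Nat × Nat) :=
  match rs[idx]? with
  | none => rs
  | some (t, s, l) =>
    if t = none ∨ m ≤ (l : Int) then rs
    else
      match (match pvSearchPrevA m rs idx with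
             | some r => some r
             | none => pvFirstStableA m (rs.drop (idx + 1))) with
      | none => rs
      | some r => rs.set idx (some r, s, l)

-- step 2: the loop itself
def pvStep2A (m : Int) (runs : List (Option Int × Nat × Nat)) : List (Option Int × Nat × Nat) :=
  (List.range runs.length).foldl (pvStepA m) runs

def debounce_speaker_ids (speaker_track_ids : List (Option Int)) (min_hold_frames : Int) : List (Option Int) :=
  if speaker_track_ids = [] then []
  else
    (pvStep2A min_hold_frames (pvOuterA speaker_track_ids 0)).foldl
      (fun acc r => acc ++ List.replicate r.2.2 r.1) []

-- ===== PORT B =====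
-- single grouping pass: runs built last-at-head, then reversed
def pvRleStep (acc : List (Option Int × Nat)) (x : Option Int) : List (Option Int × Nat) :=
  match acc with
  | [] => [(x, 1)]
  | (t, l) :: rest => if t = x then (t, l + 1) :: rest else (x, 1) :: (t, l) :: rest

def pvRleB (xs : List (Option Int)) : List (Option Int × Nat) :=
  (xs.foldl pvRleStep []).reverse

-- one prefix pass: emits, before each run, the nearest stable ID seen so far
def pvScanStep (m : Int) (acc : List (Option Int) × Option Int) (r : Option Int × Nat) :
    List (Option Int) × Option Int :=
  (acc.1 ++ [acc.2], if r.1 ≠ none ∧ m ≤ (r.2 : Int) then r.1 else acc.2)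

def pvScanB (m : Int) (rs : List (Option Int × Nat)) : List (Option Int) :=
  (rs.foldl (pvScanStep m) ([], none)).1

def debounce_speaker_ids_alt (speaker_track_ids : List (Option Int)) (min_hold_frames : Int) : List (Option Int) :=
  let rs := pvRleB speaker_track_ids
  let prevs := pvScanB min_hold_frames rs
  let nexts := (pvScanB min_hold_frames rs.reverse).reverse
  (rs.zip (prevs.zip nexts)).foldl (fun acc x =>
    acc ++
      (match x with
       | ((t, l), (p, nx)) =>
         List.replicate l
           (if t ≠ none ∧ (l : Int) < min_hold_frames then
             (match (match p with | some r => some r | none => nx) with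
              | some r => some r
              | none => t)
            else t))) []

-- ===== PRECONDITION & SPEC =====
def Spec_debounce_speaker_ids (speaker_track_ids : List (Option Int)) (min_hold_frames : Int) (out : List (Option Int)) : Prop := out = debounce_speaker_ids_alt speaker_track_ids min_hold_frames
instance (speaker_track_ids : List (Option Int)) (min_hold_frames : Int) (out : List (Option Int)) : Decidable (Spec_debounce_speaker_ids speaker_track_ids min_hold_frames out) := by unfold Spec_debounce_speaker_ids; infer_instance

-- ===== CLAIM (what is proved, stated in full; the proofs are below) =====
def Claim_equal_debounce_speaker_ids : Prop := ∀ (speaker_track_ids : List (Option Int)) (min_hold_frames : Int), Dom_debounce_speaker_ids speaker_track_ids min_hold_frames → Spec_debounce_speaker_ids speaker_track_ids min_hold_frames (debounce_speaker_ids speaker_track_ids min_hold_frames)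

-- ===== LEMMAS AND PROOFS =====

-- projection of A's runs (drop the unused start index)
def pvStrip (r : Option Int × Nat × Nat) : Option Int × Nat := (r.1, r.2.2)

-- canonical run list (tid, length)
def pvCanon : List (Option Int) → List (Option Int × Nat)
  | [] => []
  | x :: ys => (x, 1 + pvInnerA x ys) :: pvCanon (ys.drop (pvInnerA x ys))
termination_by xs => xs.length
decreasing_by simp

theorem pvOuterA_strip (xs : List (Option Int)) : ∀ i, (pvOuterA xs i).map pvStrip = pvCanon xs := by
  induction xs using pvCanon.induct with
  | case1 => intro i; simp [pvOuterA, pvCanon]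
  | case2 x ys ih => intro i; simp [pvOuterA, pvCanon, pvStrip, ih]

theorem pvRleB_aux (xs : List (Option Int)) : ∀ (t : Option Int) (l : Nat) (rest : List (Option Int × Nat)),
    (xs.foldl pvRleStep ((t, l) :: rest)).reverse
      = rest.reverse ++ (t, l + pvInnerA t xs) :: pvCanon (xs.drop (pvInnerA t xs)) := by
  induction xs with
  | nil => intro t l rest; simp [pvInnerA, pvCanon]
  | cons x ys ih =>
      intro t l rest
      by_cases hx : t = x
      · subst hx
        have hstep : pvRleStep ((t, l) :: rest) t = (t, l + 1) :: rest := by simp [pvRleStep]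
        have hi : pvInnerA t (t :: ys) = 1 + pvInnerA t ys := by simp [pvInnerA]
        rw [List.foldl_cons, hstep, ih, hi, Nat.add_comm 1 (pvInnerA t ys), List.drop_succ_cons,
          show l + 1 + pvInnerA t ys = l + (pvInnerA t ys + 1) by omega]
      · have hstep : pvRleStep ((t, l) :: rest) x = (x, 1) :: (t, l) :: rest := by
          simp [pvRleStep, hx]
        have hi : pvInnerA t (x :: ys) = 0 := by
          simp only [pvInnerA, ite_eq_right_iff]
          intro h; exact absurd h.symm hx
        rw [List.foldl_cons, hstep, ih, hi, List.drop_zero,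
          show pvCanon (x :: ys) = (x, 1 + pvInnerA x ys) :: pvCanon (ys.drop (pvInnerA x ys)) from by rw [pvCanon]]
        simp

theorem pvRleB_canon (xs : List (Option Int)) : pvRleB xs = pvCanon xs := by
  cases xs with
  | nil => simp [pvRleB, pvCanon]
  | cons x ys =>
      show (List.foldl pvRleStep (pvRleStep [] x) ys).reverse = _
      rw [show pvRleStep [] x = [(x, 1)] from rfl, pvRleB_aux,
        show pvCanon (x :: ys) = (x, 1 + pvInnerA x ys) :: pvCanon (ys.drop (pvInnerA x ys)) from by rw [pvCanon]]
      simp [Nat.add_comm]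

-- pure form of the prefix scan
def pvScanPure (m : Int) (cur : Option Int) : List (Option Int × Nat) → List (Option Int)
  | [] => []
  | r :: rest => cur :: pvScanPure m (if r.1 ≠ none ∧ m ≤ (r.2 : Int) then r.1 else cur) rest

def pvLast (m : Int) (cur : Option Int) (l : List (Option Int × Nat)) : Option Int :=
  l.foldl (fun c r => if r.1 ≠ none ∧ m ≤ (r.2 : Int) then r.1 else c) cur

def pvFirstP (m : Int) : List (Option Int × Nat) → Option Int
  | [] => none
  | r :: rest => if r.1 ≠ none ∧ m ≤ (r.2 : Int) then r.1 else pvFirstP m rest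

theorem pvScanB_aux (m : Int) (rs : List (Option Int × Nat)) :
    ∀ (acc : List (Option Int)) (cur : Option Int),
      (rs.foldl (pvScanStep m) (acc, cur)).1 = acc ++ pvScanPure m cur rs := by
  induction rs with
  | nil => intro acc cur; simp [pvScanPure]
  | cons r rest ih => intro acc cur; simp [pvScanStep, pvScanPure, ih]

theorem pvScanB_eq (m : Int) (rs : List (Option Int × Nat)) : pvScanB m rs = pvScanPure m none rs := by
  simpa [pvScanB] using pvScanB_aux m rs [] none

theorem pvScanPure_length (m : Int) (cur : Option Int) (l : List (Option Int × Nat)) :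
    (pvScanPure m cur l).length = l.length := by
  induction l generalizing cur with
  | nil => simp [pvScanPure]
  | cons r rest ih => simp [pvScanPure, ih]

theorem pvScanPure_get (m : Int) (l : List (Option Int × Nat)) (cur : Option Int) (k : Nat)
    (h : k < l.length) : (pvScanPure m cur l)[k]? = some (pvLast m cur (l.take k)) := by
  induction l generalizing cur k with
  | nil => simp at h
  | cons r rest ih =>
      cases k with
      | zero => simp [pvScanPure, pvLast]
      | succ k =>
          have hk : k < rest.length := by simpa using h
          simp only [pvScanPure, List.getElem?_cons_succ, List.take_succ_cons]
          rw [ih _ _ hk]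
          simp [pvLast]

theorem pvLast_reverse (m : Int) (l : List (Option Int × Nat)) (cur : Option Int) :
    pvLast m cur l.reverse = (match pvFirstP m l with | some x => some x | none => cur) := by
  induction l generalizing cur with
  | nil => simp [pvLast, pvFirstP]
  | cons r rest ih =>
      simp only [List.reverse_cons, pvLast, List.foldl_append, List.foldl_cons, List.foldl_nil]
      by_cases hp : r.1 ≠ none ∧ m ≤ (r.2 : Int)
      · obtain ⟨x, hx⟩ := Option.ne_none_iff_exists'.mp hp.1
        simp [pvFirstP, hp, hx]
      · rw [if_neg hp]
        show pvLast m cur rest.reverse = _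
        rw [ih]
        simp [pvFirstP, hp]

theorem pvSearchPrevA_eq (m : Int) (runs0 : List (Option Int × Nat × Nat)) (k : Nat)
    (h : k ≤ runs0.length) :
    pvSearchPrevA m runs0 k = pvLast m none ((runs0.map pvStrip).take k) := by
  induction k with
  | zero => simp [pvSearchPrevA, pvLast]
  | succ k ih =>
      have hk : k < runs0.length := by omega
      have hg : runs0[k]? = some runs0[k] := List.getElem?_eq_getElem hk
      rw [List.take_succ]
      have hg2 : (runs0.map pvStrip)[k]? = some (pvStrip runs0[k]) := by
        simp [List.getElem?_map, hg]
      rw [hg2]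
      simp only [pvSearchPrevA, hg, Option.toList_some, pvLast, List.foldl_append, List.foldl_cons,
        List.foldl_nil]
      rw [← pvLast, ← ih (by omega)]
      rcases hr' : runs0[k] with ⟨t, s, l⟩
      simp [pvStrip, hr']

theorem pvFirstStableA_eq (m : Int) (l : List (Option Int × Nat × Nat)) :
    pvFirstStableA m l = pvFirstP m (l.map pvStrip) := by
  induction l with
  | nil => simp [pvFirstStableA, pvFirstP]
  | cons r rest ih => rcases r with ⟨t, s, l⟩; simp [pvFirstStableA, pvFirstP, pvStrip, ih]

-- final tid of run k after A's step 2
def pvFinTid (m : Int) (runs0 : List (Option Int × Nat × Nat)) (k : Nat) : Option Int :=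
  match runs0[k]? with
  | none => none
  | some (t, _, l) =>
    if t = none ∨ m ≤ (l : Int) then t
    else match (match pvSearchPrevA m runs0 k with
                | some r => some r
                | none => pvFirstStableA m (runs0.drop (k + 1))) with
         | none => t
         | some r => some r

theorem pvFinTid_stable (m : Int) (runs0 : List (Option Int × Nat × Nat)) (k : Nat)
    (t : Option Int) (s l : Nat) (hg : runs0[k]? = some (t, s, l))
    (hm : t = none ∨ m ≤ (l : Int)) : pvFinTid m runs0 k = t := by
  simp [pvFinTid, hg, hm]

-- relation preserved by step 2's in-place updates: second component untouched,
-- stable entries (length ≥ min_hold) never modified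
def pvRel (m : Int) (r r' : Option Int × Nat × Nat) : Prop :=
  r.2 = r'.2 ∧ (m ≤ (r.2.2 : Int) → r = r')

theorem pvFirstStableA_cong (m : Int) : ∀ (l1 l2 : List (Option Int × Nat × Nat)),
    l1.length = l2.length →
    (∀ k (h1 : k < l1.length) (h2 : k < l2.length), pvRel m l1[k] l2[k]) →
    pvFirstStableA m l1 = pvFirstStableA m l2 := by
  intro l1
  induction l1 with
  | nil => intro l2 hl _; cases l2 with
      | nil => rfl
      | cons _ _ => simp at hl
  | cons r1 rest1 ih =>
      intro l2 hl hrel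
      cases l2 with
      | nil => simp at hl
      | cons r2 rest2 =>
          have h0 := hrel 0 (by simp) (by simp)
          rcases r1 with ⟨t1, s1, l1'⟩
          rcases r2 with ⟨t2, s2, l2'⟩
          obtain ⟨hsnd, heq⟩ := h0
          obtain ⟨-, hl'⟩ : s1 = s2 ∧ l1' = l2' := by simpa using hsnd
          have htail : pvFirstStableA m rest1 = pvFirstStableA m rest2 :=
            ih rest2 (by simpa using hl) (fun k h1 h2 => hrel (k + 1) (by simpa using h1) (by simpa using h2))
          by_cases hm : m ≤ (l1' : Int)
          · obtain ⟨ht, -, -⟩ : t1 = t2 ∧ s1 = s2 ∧ l1' = l2' := by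
              simpa using heq (by simpa using hm)
            subst ht; subst hl'
            simp only [pvFirstStableA]
            split_ifs with hc
            · rfl
            · exact htail
          · simp only [pvFirstStableA]
            rw [if_neg (by simp_all), if_neg (by rw [← hl']; simp_all)]
            exact htail

theorem pvSearchPrevA_cong (m : Int) (rs rs' : List (Option Int × Nat × Nat))
    (hrel : ∀ j (h1 : j < rs.length) (h2 : j < rs'.length), pvRel m rs[j] rs'[j])
    (hlen : rs.length = rs'.length) :
    ∀ k, k ≤ rs.length → pvSearchPrevA m rs k = pvSearchPrevA m rs' k := by
  intro k
  induction k with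
  | zero => intro _; rfl
  | succ k ihk =>
      intro hk
      have hk1 : k < rs.length := by omega
      have hk2 : k < rs'.length := by omega
      have hg1 : rs[k]? = some rs[k] := List.getElem?_eq_getElem hk1
      have hg2 : rs'[k]? = some rs'[k] := List.getElem?_eq_getElem hk2
      obtain ⟨hsnd, heq⟩ := hrel k hk1 hk2
      rcases h1 : rs[k] with ⟨t1, s1, l1'⟩
      rcases h2 : rs'[k] with ⟨t2, s2, l2'⟩
      rw [h1, h2] at hsnd heq
      obtain ⟨-, hl'⟩ : s1 = s2 ∧ l1' = l2' := by simpa using hsnd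
      have htail := ihk (by omega)
      simp only [pvSearchPrevA, hg1, hg2, h1, h2]
      by_cases hm : m ≤ (l1' : Int)
      · have := heq (by simpa using hm)
        simp only [Prod.mk.injEq] at this
        obtain ⟨ht, -, -⟩ := this
        subst ht; subst hl'
        split_ifs with hc
        · rfl
        · exact htail
      · rw [if_neg (by simp_all), if_neg (by rw [← hl']; simp_all)]
        exact htail

-- loop invariant for step 2: after processing indices < p, entry k carries its final
-- tid for k < p and its original value otherwise
def pvGood (m : Int) (runs0 : List (Option Int × Nat × Nat)) (p : Nat)
    (rs : List (Option Int × Nat × Nat)) : Prop :=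
  rs.length = runs0.length ∧
    ∀ k, rs[k]? = if k < p then (runs0[k]?).map (fun r => (pvFinTid m runs0 k, r.2)) else runs0[k]?

theorem pvGood_rel (m : Int) (runs0 : List (Option Int × Nat × Nat)) (p : Nat)
    (rs : List (Option Int × Nat × Nat)) (hg : pvGood m runs0 p rs) :
    ∀ j (h1 : j < rs.length) (h2 : j < runs0.length), pvRel m rs[j] runs0[j] := by
  intro j h1 h2
  have hj := hg.2 j
  rw [List.getElem?_eq_getElem h1, List.getElem?_eq_getElem h2] at hj
  by_cases hjp : j < p
  · rw [if_pos hjp] at hj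
    simp only [Option.map_some, Option.some.injEq] at hj
    rcases hr : runs0[j] with ⟨t, s, l⟩
    rw [hr] at hj
    constructor
    · rw [hj]
    · intro hm
      rw [hj] at hm ⊢
      have hfin : pvFinTid m runs0 j = t :=
        pvFinTid_stable m runs0 j t s l (by rw [List.getElem?_eq_getElem h2, hr]) (Or.inr hm)
      rw [hfin]
  · rw [if_neg hjp] at hj
    have heq : rs[j] = runs0[j] := by injection hj
    exact ⟨by rw [heq], fun _ => by rw [heq]⟩

theorem pvGood_step (m : Int) (runs0 : List (Option Int × Nat × Nat)) (p : Nat)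
    (rs : List (Option Int × Nat × Nat)) (hg : pvGood m runs0 p rs) :
    pvGood m runs0 (p + 1) (pvStepA m rs p) := by
  obtain ⟨hlen, hget⟩ := hg
  have hrel := pvGood_rel m runs0 p rs ⟨hlen, hget⟩
  have hgp : rs[p]? = runs0[p]? := by
    have := hget p
    rwa [if_neg (lt_irrefl p)] at this
  by_cases hp : p < runs0.length
  · rcases hr0 : runs0[p] with ⟨t, s, l⟩
    have hg0 : runs0[p]? = some (t, s, l) := by rw [List.getElem?_eq_getElem hp, hr0]
    have hgp' : rs[p]? = some (t, s, l) := by rw [hgp, hg0]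
    have hsp : pvSearchPrevA m rs p = pvSearchPrevA m runs0 p :=
      pvSearchPrevA_cong m rs runs0 hrel (by omega) p (by omega)
    have hfs : pvFirstStableA m (rs.drop (p + 1)) = pvFirstStableA m (runs0.drop (p + 1)) := by
      apply pvFirstStableA_cong m _ _ (by simp [hlen])
      intro k h1 h2
      simp only [List.getElem_drop]
      exact hrel (p + 1 + k) (by simp [List.length_drop] at h1; omega)
        (by simp [List.length_drop] at h2; omega)
    by_cases hc : t = none ∨ m ≤ (l : Int)
    · have hstep : pvStepA m rs p = rs := by
        simp only [pvStepA, hgp']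
        rw [if_pos hc]
      rw [hstep]
      refine ⟨hlen, fun k => ?_⟩
      by_cases hkp : k = p
      · subst hkp
        rw [if_pos (by omega), hgp', hg0]
        simp [pvFinTid_stable m runs0 k t s l hg0 hc]
      · have := hget k
        rw [this]
        by_cases hklt : k < p
        · rw [if_pos hklt, if_pos (by omega)]
        · rw [if_neg hklt, if_neg (by omega)]
    · have hrepeq : (match pvSearchPrevA m rs p with
              | some r => some r
              | none => pvFirstStableA m (rs.drop (p + 1)))
            = (match pvSearchPrevA m runs0 p with
              | some r => some r
              | none => pvFirstStableA m (runs0.drop (p + 1))) := by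
        rw [hsp, hfs]
      have hfin : pvFinTid m runs0 p
          = (match (match pvSearchPrevA m runs0 p with
                    | some r => some r
                    | none => pvFirstStableA m (runs0.drop (p + 1))) with
             | none => t
             | some r => some r) := by
        simp [pvFinTid, hg0, hc]
      cases hrep : (match pvSearchPrevA m runs0 p with
              | some r => some r
              | none => pvFirstStableA m (runs0.drop (p + 1))) with
      | none =>
          have hstep : pvStepA m rs p = rs := by
            simp only [pvStepA, hgp']
            rw [if_neg hc, hrepeq, hrep]
          rw [hstep]
          refine ⟨hlen, fun k => ?_⟩
          by_cases hkp : k = p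
          · subst hkp
            rw [if_pos (by omega), hgp', hg0]
            rw [hfin, hrep]
            rfl
          · have := hget k
            rw [this]
            by_cases hklt : k < p
            · rw [if_pos hklt, if_pos (by omega)]
            · rw [if_neg hklt, if_neg (by omega)]
      | some r =>
          have hstep : pvStepA m rs p = rs.set p (some r, s, l) := by
            simp only [pvStepA, hgp']
            rw [if_neg hc, hrepeq, hrep]
          rw [hstep]
          refine ⟨by simp [hlen], fun k => ?_⟩
          rw [List.getElem?_set]
          by_cases hkp : k = p
          · subst hkp
            rw [if_pos rfl, if_pos (by omega), if_pos (by omega), hg0]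
            rw [hfin, hrep]
            rfl
          · rw [if_neg (by omega)]
            have := hget k
            rw [this]
            by_cases hklt : k < p
            · rw [if_pos hklt, if_pos (by omega)]
            · rw [if_neg hklt, if_neg (by omega)]
  · have hnone : runs0[p]? = none := List.getElem?_eq_none (by omega)
    have hstep : pvStepA m rs p = rs := by
      simp only [pvStepA, hgp, hnone]
    rw [hstep]
    refine ⟨hlen, fun k => ?_⟩
    by_cases hkp : k = p
    · subst hkp
      rw [if_pos (by omega), hgp, hnone]
      rfl
    · have := hget k
      rw [this]
      by_cases hklt : k < p
      · rw [if_pos hklt, if_pos (by omega)]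
      · rw [if_neg hklt, if_neg (by omega)]

theorem pvStep2A_good (m : Int) (runs0 : List (Option Int × Nat × Nat)) :
    pvGood m runs0 runs0.length (pvStep2A m runs0) := by
  have h : ∀ p, pvGood m runs0 p ((List.range p).foldl (pvStepA m) runs0) := by
    intro p
    induction p with
    | zero => exact ⟨rfl, fun k => by simp⟩
    | succ p ih =>
        rw [List.range_succ, List.foldl_append, List.foldl_cons, List.foldl_nil]
        exact pvGood_step m runs0 p _ ih
  exact h runs0.length

theorem pvStep2A_get (m : Int) (runs0 : List (Option Int × Nat × Nat)) (k : Nat) :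
    (pvStep2A m runs0)[k]? = (runs0[k]?).map (fun r => (pvFinTid m runs0 k, r.2)) := by
  obtain ⟨hlen, hget⟩ := pvStep2A_good m runs0
  have := hget k
  by_cases hk : k < runs0.length
  · rwa [if_pos hk] at this
  · rw [if_neg hk] at this
    rw [this, List.getElem?_eq_none (by omega)]
    rfl

theorem pvStep2A_length (m : Int) (runs0 : List (Option Int × Nat × Nat)) :
    (pvStep2A m runs0).length = runs0.length :=
  (pvStep2A_good m runs0).1

theorem pv_main (xs : List (Option Int)) (m : Int) :
    debounce_speaker_ids xs m = debounce_speaker_ids_alt xs m := by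
  by_cases hxs : xs = []
  · subst hxs; rfl
  · have hrs : pvRleB xs = (pvOuterA xs 0).map pvStrip := by
      rw [pvRleB_canon, pvOuterA_strip]
    unfold debounce_speaker_ids debounce_speaker_ids_alt
    rw [if_neg hxs]
    rw [PySem.List.foldl_append_eq_flatMap, PySem.List.foldl_append_eq_flatMap,
      List.nil_append, List.nil_append]
    rw [List.flatMap_def, List.flatMap_def]
    apply congrArg List.flatten
    set runs0 := pvOuterA xs 0 with hruns0
    set n := runs0.length with hn
    set rs := pvRleB xs with hrsdef
    have hrslen : rs.length = n := by rw [hrs]; simp only [List.length_map]; exact hn.symm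
    have hprevlen : (pvScanB m rs).length = n := by
      rw [pvScanB_eq, pvScanPure_length, hrslen]
    have hnextlen : ((pvScanB m rs.reverse).reverse).length = n := by
      rw [List.length_reverse, pvScanB_eq, pvScanPure_length, List.length_reverse, hrslen]
    have hzlen : (rs.zip ((pvScanB m rs).zip ((pvScanB m rs.reverse).reverse))).length = n := by
      simp only [List.length_zip, hrslen, hprevlen, hnextlen]
      omega
    apply List.ext_getElem
    · simp only [List.length_map, hzlen, pvStep2A_length]
      rfl
    · intro k h1 h2
      have hk : k < n := by
        simp only [List.length_map, pvStep2A_length] at h1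
        exact h1
      have hkr : k < runs0.length := hk
      have hg0 : runs0[k]? = some runs0[k] := List.getElem?_eq_getElem hkr
      rcases hr0 : runs0[k] with ⟨t, s, l⟩
      have hg0' : runs0[k]? = some (t, s, l) := by rw [hg0, hr0]
      -- A side element
      have hA? : (pvStep2A m runs0)[k]? = some (pvFinTid m runs0 k, s, l) := by
        rw [pvStep2A_get, hg0']
        rfl
      have hAk : k < (pvStep2A m runs0).length := by rw [pvStep2A_length]; exact hkr
      have hAel : (pvStep2A m runs0)[k] = (pvFinTid m runs0 k, s, l) := by
        have := List.getElem?_eq_getElem hAk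
        rw [hA?] at this
        exact (Option.some.inj this).symm
      -- rs element
      have hrsk : k < rs.length := by rw [hrslen]; exact hk
      have hrsel : rs[k] = (t, l) := by
        have : rs[k]? = some (t, l) := by
          rw [hrs, List.getElem?_map, hg0']
          rfl
        have h' := List.getElem?_eq_getElem hrsk
        rw [this] at h'
        exact (Option.some.inj h').symm
      -- prevs element
      have hpel : (pvScanB m rs)[k]'(by rw [hprevlen]; exact hk) = pvSearchPrevA m runs0 k := by
        have h1' : (pvScanB m rs)[k]? = some (pvLast m none (rs.take k)) := by
          rw [pvScanB_eq]
          exact pvScanPure_get m rs none k hrsk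
        have h2' : pvSearchPrevA m runs0 k = pvLast m none (rs.take k) := by
          rw [pvSearchPrevA_eq m runs0 k (le_of_lt hkr), hrs]
        have h' := List.getElem?_eq_getElem (show k < (pvScanB m rs).length by rw [hprevlen]; exact hk)
        rw [h1'] at h'
        rw [← h2'] at h'
        exact (Option.some.inj h').symm
      -- nexts element
      have hmatchid : ∀ o : Option Int, (match o with | some x => some x | none => (none : Option Int)) = o := by
        intro o; cases o <;> rfl
      have hnel : ((pvScanB m rs.reverse).reverse)[k]'(by rw [hnextlen]; exact hk)
          = pvFirstStableA m (runs0.drop (k + 1)) := by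
        have hsl : (pvScanB m rs.reverse).length = n := by
          rw [pvScanB_eq, pvScanPure_length, List.length_reverse, hrslen]
        have hj : n - 1 - k < n := by omega
        have hjr : n - 1 - k < rs.reverse.length := by rw [List.length_reverse, hrslen]; exact hj
        have h1' : (pvScanB m rs.reverse)[n - 1 - k]?
            = some (pvLast m none (rs.reverse.take (n - 1 - k))) := by
          rw [pvScanB_eq]
          exact pvScanPure_get m rs.reverse none (n - 1 - k) hjr
        have htk : rs.reverse.take (n - 1 - k) = (rs.drop (k + 1)).reverse := by
          have hidx : rs.length - (n - 1 - k) = k + 1 := by rw [hrslen]; omega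
          rw [List.take_reverse, hidx]
        have hfp : pvLast m none (rs.reverse.take (n - 1 - k)) = pvFirstStableA m (runs0.drop (k + 1)) := by
          rw [htk, pvLast_reverse, pvFirstStableA_eq, List.map_drop, ← hrs]
          exact hmatchid _
        rw [List.getElem_reverse]
        have hidx2 : (pvScanB m rs.reverse).length - 1 - k < (pvScanB m rs.reverse).length := by
          rw [hsl]; omega
        have h' := List.getElem?_eq_getElem hidx2
        have h'' : some ((pvScanB m rs.reverse)[(pvScanB m rs.reverse).length - 1 - k]'hidx2)
            = some (pvFirstStableA m (runs0.drop (k + 1))) := by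
          rw [← h', show (pvScanB m rs.reverse).length - 1 - k = n - 1 - k from by rw [hsl], h1', hfp]
        exact Option.some.inj h''
      -- put the pieces together
      rw [List.getElem_map, List.getElem_map, List.getElem_zip, List.getElem_zip, hAel, hrsel,
        hpel, hnel]
      simp only [pvFinTid, hg0']
      by_cases hc : t = none ∨ m ≤ (l : Int)
      · rw [if_pos hc, if_neg (by
          intro hcon
          rcases hc with h0 | h0
          · exact hcon.1 h0
          · have := hcon.2
            omega)]
      · rw [if_neg hc, if_pos (show t ≠ none ∧ (l : Int) < m by
          refine ⟨fun ht => hc (Or.inl ht), ?_⟩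
          have hnl : ¬ m ≤ (l : Int) := fun hm => hc (Or.inr hm)
          omega)]
        cases hval : (match pvSearchPrevA m runs0 k with
            | some r => some r
            | none => pvFirstStableA m (List.drop (k + 1) runs0)) with
        | none => rfl
        | some r => rfl

-- ===== VERDICT (by name: the statement is the Claim_ definition above) =====
theorem debounce_speaker_ids_spec : Claim_equal_debounce_speaker_ids := by
  intro xs m _
  unfold Spec_debounce_speaker_ids
  exact pv_main xs m
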